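-- pv_equiv track=rewrite | github.com/Nemrtvej/AdventOfCode2019 | src/day_01/main.py | calc_with_fuel
-- ===== SOURCE A (Python) =====
-- import math
--
-- def calc(mass: int) -> int:
--     return math.floor(mass / 3) - 2
--
-- def calc_with_fuel(initial_mass: int) -> int:
--     result = 0
--     required_fuel_to_transport_fuel = calc(initial_mass)
--
--     while required_fuel_to_transport_fuel > 0:
--         result += required_fuel_to_transport_fuel
--         required_fuel = required_fuel_to_transport_fuel
--         required_fuel_to_transport_fuel = calc(required_fuel)
--
--     return result
-- ===== SOURCE B (Python) =====
-- import math
--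
-- def calc(mass: int) -> int:
--     return math.floor(mass / 3) - 2
--
-- def calc_with_fuel(initial_mass: int) -> int:
--     f = calc(initial_mass)
--     if f <= 0:
--         return 0
--     return f + calc_with_fuel(f)
-- ===== Notes on version B (the rewrite author's own statement) =====
-- stated objective: simpler
-- what changed: Replaced the while-loop with its running accumulator by a direct structural recursion on the fuel chain: compute the next fuel and, while it is positive, add it to a recursive call on that fuel.
import Mathlib
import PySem

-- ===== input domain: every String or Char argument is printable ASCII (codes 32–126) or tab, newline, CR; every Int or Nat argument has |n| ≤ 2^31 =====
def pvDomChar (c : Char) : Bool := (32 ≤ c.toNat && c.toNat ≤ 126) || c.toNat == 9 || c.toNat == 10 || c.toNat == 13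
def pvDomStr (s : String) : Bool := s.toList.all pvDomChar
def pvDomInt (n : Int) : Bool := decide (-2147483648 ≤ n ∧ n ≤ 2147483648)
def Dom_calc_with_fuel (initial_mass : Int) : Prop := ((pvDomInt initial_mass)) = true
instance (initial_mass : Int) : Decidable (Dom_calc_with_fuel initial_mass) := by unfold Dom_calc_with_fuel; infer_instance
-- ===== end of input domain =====

-- B replaces A's while-loop with an accumulator by a direct recursion on the fuel chain (simpler decomposition; same cost).


-- ===== PORT A =====
-- calc: math.floor(mass / 3) - 2; on |mass| ≤ 2^31 the float division is exact enough that
-- math.floor(mass / 3) = mass // 3, so this is ported as Python floor division (PySem.Int.floordiv).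
def pyCalc (mass : Int) : Int := PySem.Int.floordiv mass 3 - 2

theorem pyCalc_lt (f : Int) (hf : 0 < f) : (pyCalc f).toNat < f.toNat := by
  have h3 : (0:Int) < 3 := by omega
  have : PySem.Int.floordiv f 3 = f / 3 := PySem.Int.floordiv_eq_ediv_of_pos h3
  unfold pyCalc
  rw [this]
  omega

theorem pyCalc_pos_mass (m : Int) (h : 0 < pyCalc m) : 0 < m := by
  unfold pyCalc at h
  rw [PySem.Int.floordiv_eq_ediv_of_pos (by omega : (0:Int) < 3)] at h
  omega

-- the while loop: state (required_fuel_to_transport_fuel, result)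
def calcLoopA (f result : Int) : Int :=
  if 0 < f then calcLoopA (pyCalc f) (result + f) else result
termination_by f.toNat
decreasing_by exact pyCalc_lt f (by omega)

def calc_with_fuel (initial_mass : Int) : Int :=
  calcLoopA (pyCalc initial_mass) 0

-- ===== PORT B =====
def calc_with_fuel_alt (initial_mass : Int) : Int :=
  let f := pyCalc initial_mass
  if f ≤ 0 then 0 else f + calc_with_fuel_alt f
termination_by initial_mass.toNat
decreasing_by
  rename_i h
  exact pyCalc_lt initial_mass (pyCalc_pos_mass initial_mass (not_le.mp h))

-- ===== PRECONDITION & SPEC =====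
def Spec_calc_with_fuel (initial_mass : Int) (out : Int) : Prop := out = calc_with_fuel_alt initial_mass
instance (initial_mass : Int) (out : Int) : Decidable (Spec_calc_with_fuel initial_mass out) := by unfold Spec_calc_with_fuel; infer_instance

-- ===== CLAIM (what is proved, stated in full; the proofs are below) =====
def Claim_equal_calc_with_fuel : Prop := ∀ (initial_mass : Int), Dom_calc_with_fuel initial_mass → Spec_calc_with_fuel initial_mass (calc_with_fuel initial_mass)

-- ===== LEMMAS AND PROOFS =====

-- chain sum of fuel values, the common characterisation of both programs
def chainSum (f : Int) : Int :=
  if 0 < f then f + chainSum (pyCalc f) else 0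
termination_by f.toNat
decreasing_by exact pyCalc_lt f (by omega)

theorem calcLoopA_eq (f result : Int) : calcLoopA f result = result + chainSum f := by
  induction f, result using calcLoopA.induct with
  | case1 f result h ih =>
      rw [calcLoopA, chainSum, if_pos h, if_pos h, ih]; ring
  | case2 f result h =>
      rw [calcLoopA, chainSum, if_neg h, if_neg h]; ring

theorem alt_eq_chainSum (m : Int) : calc_with_fuel_alt m = chainSum (pyCalc m) := by
  induction m using calc_with_fuel_alt.induct with
  | case1 m f hf =>
      rw [calc_with_fuel_alt]
      simp only [show pyCalc m = f from rfl, if_pos hf]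
      rw [chainSum, if_neg (by omega)]
  | case2 m f hf ih =>
      rw [calc_with_fuel_alt]
      simp only [show pyCalc m = f from rfl, if_neg hf]
      rw [chainSum, if_pos (by omega), ih]

-- ===== VERDICT (by name: the statement is the Claim_ definition above) =====
theorem calc_with_fuel_spec : Claim_equal_calc_with_fuel := by
  intro m _
  unfold Spec_calc_with_fuel calc_with_fuel
  rw [calcLoopA_eq, alt_eq_chainSum]
  ring
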